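-- pv_equiv track=rewrite | github.com/andrewt110216/iq-tester-game | tests/test_session_settings.py | categorize_output
-- ===== SOURCE A (Python) =====
-- from typing import Any, List
--
-- def categorize_output(output: str, categories: List[str]) -> List[int]:
--     """Count the number of lines matching each category"""
--     counts = [0] * len(categories)
--     for line in output.split('\n'):
--         # For all categories except blank, check if category is `in`` line
--         for i, category in enumerate(categories[:-1]):
--             if category in line:
--                 counts[i] += 1
--         # Check if line is blank
--         if line == categories[-1]:
--             counts[-1] += 1
--     return counts
-- ===== SOURCE B (Python) =====
-- def categorize_output(output, categories):
--     """Count the number of lines matching each category"""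
--     freq = {}
--     for line in output.split('\n'):
--         freq[line] = freq.get(line, 0) + 1
--     counts = [sum(m for line, m in freq.items() if cat in line)
--               for cat in categories[:-1]]
--     counts.append(freq.get(categories[-1], 0))
--     return counts
-- ===== Notes on version B (the rewrite author's own statement) =====
-- stated objective: alternative
-- what changed: B first builds a frequency dictionary of distinct lines (a hand-rolled Counter), then sums multiplicities of the distinct lines containing each substring category and reads the last (exact-match) count off the dictionary with a single get, instead of A's one shared pass over all lines updating a mutable counts list per category.
import Mathlib
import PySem

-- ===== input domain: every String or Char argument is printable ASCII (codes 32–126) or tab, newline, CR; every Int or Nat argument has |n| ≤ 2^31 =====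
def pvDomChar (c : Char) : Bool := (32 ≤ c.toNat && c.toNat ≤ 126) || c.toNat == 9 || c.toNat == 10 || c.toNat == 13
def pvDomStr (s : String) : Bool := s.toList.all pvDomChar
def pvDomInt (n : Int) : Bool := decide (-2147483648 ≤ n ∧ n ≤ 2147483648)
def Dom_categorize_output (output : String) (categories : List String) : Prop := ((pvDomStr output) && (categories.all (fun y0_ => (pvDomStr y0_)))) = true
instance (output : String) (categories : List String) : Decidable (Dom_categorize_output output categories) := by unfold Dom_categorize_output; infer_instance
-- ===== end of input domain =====

-- B builds a frequency dictionary of the distinct lines first, then sums multiplicities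
-- per substring category and reads the exact-match last category off the dictionary,
-- instead of A's shared per-line pass mutating a counts list; objective: alternative.

-- ===== PORT A =====
def categorize_output (output : String) (categories : List String) : List Int :=
  let counts := List.replicate categories.length (0 : Int)
  ((PySem.Str.split? output "\n").getD []).foldl (fun counts line =>
    let counts :=
      (PySem.List.enumerate (PySem.List.slice categories none (some (-1))) 0).foldl
        (fun cnt p =>
          if PySem.Str.isIn p.2 line then
            PySem.List.pySetD cnt p.1 (PySem.List.pyGetD cnt p.1 0 + 1)
          else cnt) counts
    -- counts[-1] / categories[-1]: total pyGetD/pySetD forms, exact under Pre_ (categories ≠ []);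
    -- split? is none only for an empty separator, so .getD [] is exact here
    if line == PySem.List.pyGetD categories (-1) "" then
      PySem.List.pySetD counts (-1) (PySem.List.pyGetD counts (-1) 0 + 1)
    else counts) counts

-- ===== PORT B =====
def categorize_output_alt (output : String) (categories : List String) : List Int :=
  let lines := (PySem.Str.split? output "\n").getD []   -- sep ≠ "", so .getD [] is exact
  let freq : PySem.Dict String Int :=
    lines.foldl (fun d line => d.insert line (d.getD line 0 + 1)) PySem.Dict.empty
  let counts := (PySem.List.slice categories none (some (-1))).map
    (fun cat => (freq.items.filter (fun q => PySem.Str.isIn cat q.1)).foldl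
      (fun s q => s + q.2) 0)
  -- categories[-1]: total pyGetD form, exact under Pre_ (categories ≠ [])
  counts ++ [freq.getD (PySem.List.pyGetD categories (-1) "") 0]

-- ===== PRECONDITION & SPEC =====
-- Pre_ excludes only categories = [], where Python A raises IndexError on categories[-1] (B raises there too).
def Pre_categorize_output (output : String) (categories : List String) : Prop := categories ≠ []
instance (output : String) (categories : List String) : Decidable (Pre_categorize_output output categories) := by unfold Pre_categorize_output; infer_instance
def pvWitness_categorize_output : String × List String := ("win!\n\nloss", ["win", ""])

def Spec_categorize_output (output : String) (categories : List String) (out : List Int) : Prop := out = categorize_output_alt output categories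
instance (output : String) (categories : List String) (out : List Int) : Decidable (Spec_categorize_output output categories out) := by unfold Spec_categorize_output; infer_instance

-- ===== CLAIM (what is proved, stated in full; the proofs are below) =====
def Claim_equal_categorize_output : Prop := ∀ (output : String) (categories : List String), Dom_categorize_output output categories → Pre_categorize_output output categories → Spec_categorize_output output categories (categorize_output output categories)

-- ===== LEMMAS AND PROOFS =====

-- ---------- A side: the shared pass computes per-category countP vectors ----------

-- the inner loop's update function, closed over the current line
def pvUpd (line : String) : List Int → Int × String → List Int := fun cnt p =>
  if PySem.Str.isIn p.2 line then
    PySem.List.pySetD cnt p.1 (PySem.List.pyGetD cnt p.1 0 + 1)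
  else cnt

-- the inner fold with all indices ≥ s+1 never touches the head
lemma pv_shift (line : String) (init : List String) :
    ∀ (s : Nat) (a : Int) (acc : List Int),
      (PySem.List.enumerate init ((s : Int) + 1)).foldl (pvUpd line) (a :: acc)
        = a :: (PySem.List.enumerate init (s : Int)).foldl (pvUpd line) acc := by
  induction init with
  | nil => intro s a acc; simp [PySem.List.enumerate]
  | cons c cs ih =>
      intro s a acc
      rw [PySem.List.enumerate_cons, PySem.List.enumerate_cons]
      simp only [List.foldl_cons]
      have hcast : ((s : Int) + 1) = ((s + 1 : Nat) : Int) := by push_cast; ring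
      have hupd : pvUpd line (a :: acc) ((s : Int) + 1, c)
          = a :: pvUpd line acc ((s : Int), c) := by
        unfold pvUpd
        by_cases h : PySem.Str.isIn c line
        · rw [if_pos h, if_pos h, hcast, PySem.List.pySetD_natCast, PySem.List.pyGetD_natCast,
              PySem.List.pySetD_natCast, PySem.List.pyGetD_natCast]
          simp
        · rw [if_neg h, if_neg h]
      rw [hupd]
      have h2 : ((s : Int) + 1) + 1 = (((s + 1 : Nat) : Int) + 1) := by push_cast; ring
      rw [h2, ih (s + 1) a (pvUpd line acc ((s : Int), c)), hcast]

-- the inner fold adds the per-category indicator vector, leaving the last slot alone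
lemma pv_inner (line : String) :
    ∀ (init : List String) (b : List Int) (z : Int), b.length = init.length →
      (PySem.List.enumerate init (0 : Int)).foldl (pvUpd line) (b ++ [z])
        = (List.zipWith (· + ·) b
            (init.map (fun c => if PySem.Str.isIn c line then (1 : Int) else 0))) ++ [z] := by
  intro init
  induction init with
  | nil =>
      intro b z hb
      have : b = [] := List.eq_nil_of_length_eq_zero hb
      simp [this, PySem.List.enumerate]
  | cons c cs ih =>
      intro b z hb
      match b with
      | b0 :: b' =>
        rw [PySem.List.enumerate_cons]
        simp only [List.foldl_cons, List.cons_append]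
        have hupd : pvUpd line (b0 :: (b' ++ [z])) ((0 : Int), c)
            = (b0 + (if PySem.Str.isIn c line then (1 : Int) else 0)) :: (b' ++ [z]) := by
          unfold pvUpd
          by_cases h : PySem.Str.isIn c line
          · rw [if_pos h, if_pos h, PySem.List.pyGetD_zero_cons,
                PySem.List.pySetD_of_nonneg _ _ (by norm_num)]
            simp
          · rw [if_neg h, if_neg h]; simp
        rw [hupd]
        have h01 : (0 : Int) + 1 = ((0 : Nat) : Int) + 1 := by norm_num
        rw [h01, pv_shift line cs 0 _ (b' ++ [z])]
        rw [show ((0 : Nat) : Int) = (0 : Int) from by norm_num]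
        rw [ih b' z (by simpa using hb)]
        simp

-- counts[-1] += … writes the last slot of a snoc list
lemma pv_set_last (w : List Int) (y v : Int) :
    PySem.List.pySetD (w ++ [y]) (-1) v = w ++ [v] := by
  simp only [PySem.List.pySetD, PySem.List.pySet?, PySem.List.pyIdx?]
  norm_num

lemma pv_zip_assoc : ∀ (a b c : List Int),
    List.zipWith (· + ·) (List.zipWith (· + ·) a b) c
      = List.zipWith (· + ·) a (List.zipWith (· + ·) b c) := by
  intro a
  induction a with
  | nil => intro b c; simp
  | cons x a ih =>
      intro b c
      cases b with
      | nil => simp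
      | cons y b =>
        cases c with
        | nil => simp
        | cons z c => simp [ih, add_assoc]

lemma pv_zip_zero_right : ∀ (b : List Int) (v : List Int), (∀ x ∈ v, x = 0) →
    b.length = v.length → List.zipWith (· + ·) b v = b := by
  intro b
  induction b with
  | nil => intro v _ _; simp
  | cons x b ih =>
      intro v hv hl
      cases v with
      | nil => simp at hl
      | cons y v =>
        have : y = 0 := hv y (by simp)
        simp [this, ih v (fun x hx => hv x (by simp [hx])) (by simpa using hl)]

lemma pv_zip_zero_left : ∀ (n : Nat) (v : List Int), v.length = n →
    List.zipWith (· + ·) (List.replicate n (0 : Int)) v = v := by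
  intro n
  induction n with
  | zero => intro v h; simp [List.eq_nil_of_length_eq_zero h]
  | succ n ih =>
      intro v h
      cases v with
      | nil => simp at h
      | cons x v => simp [List.replicate_succ, ih v (by simpa using h)]

lemma pv_zip_map (f g : String → Int) : ∀ (l : List String),
    List.zipWith (· + ·) (l.map f) (l.map g) = l.map (fun c => f c + g c) := by
  intro l
  induction l with
  | nil => simp
  | cons c l ih => simp [ih]

-- main loop invariant: the shared pass adds each line's contribution vector
lemma pv_main (init : List String) (last : String) :
    ∀ (lines : List String) (b : List Int) (z : Int), b.length = init.length →
      lines.foldl (fun counts line =>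
        let counts :=
          (PySem.List.enumerate init 0).foldl
            (fun cnt p =>
              if PySem.Str.isIn p.2 line then
                PySem.List.pySetD cnt p.1 (PySem.List.pyGetD cnt p.1 0 + 1)
              else cnt) counts
        if line == last then
          PySem.List.pySetD counts (-1) (PySem.List.pyGetD counts (-1) 0 + 1)
        else counts) (b ++ [z])
      = (List.zipWith (· + ·) b
          (init.map (fun c => ((lines.countP (fun line => PySem.Str.isIn c line)) : Int))))
        ++ [z + ((lines.countP (fun line => line == last)) : Int)] := by
  intro lines
  induction lines with
  | nil =>
      intro b z hb
      simp only [List.foldl_nil, List.countP_nil, Nat.cast_zero, add_zero]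
      rw [pv_zip_zero_right b _ (by intro x hx; simp at hx; obtain ⟨c, _, hc⟩ := hx; omega)
        (by simpa using hb)]
  | cons l ls ih =>
      intro b z hb
      rw [List.foldl_cons]
      show ls.foldl _
          (let counts := (PySem.List.enumerate init 0).foldl (pvUpd l) (b ++ [z])
           if l == last then
             PySem.List.pySetD counts (-1) (PySem.List.pyGetD counts (-1) 0 + 1)
           else counts) = _
      rw [pv_inner l init b z hb]
      have hkey : ∀ (w : List Int) (y : Int),
          (if l == last then PySem.List.pySetD (w ++ [y]) (-1)
              (PySem.List.pyGetD (w ++ [y]) (-1) 0 + 1)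
           else w ++ [y])
          = w ++ [y + (if l == last then (1 : Int) else 0)] := by
        intro w y
        by_cases h : l == last
        · rw [if_pos h, if_pos h, PySem.List.pyGetD_neg_one_append_singleton, pv_set_last]
        · rw [if_neg h, if_neg h, add_zero]
      rw [hkey]
      rw [ih _ _ (by simp [hb])]
      rw [pv_zip_assoc, pv_zip_map]
      congr 1
      · apply congrArg
        apply List.map_congr_left
        intro c _
        rw [List.countP_cons]
        push_cast
        ring_nf
      · rw [List.countP_cons]
        push_cast
        ring_nf

lemma pv_slice_snoc (init : List String) (last : String) :
    PySem.List.slice (init ++ [last]) none (some (-1)) = init := by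
  rw [show (-1 : Int) = -((1 : Nat) : Int) from by norm_num]
  rw [PySem.List.slice_to_neg_natCast (init ++ [last]) 1 (by norm_num)]
  simp

-- ---------- B side: the frequency dictionary recovers the same countP vectors ----------

-- the sum-accumulating fold is a sum
lemma pv_foldl_sum : ∀ (xs : List (String × Int)) (a : Int),
    xs.foldl (fun s q => s + q.2) a = a + (xs.map (·.2)).sum := by
  intro xs
  induction xs with
  | nil => intro a; simp
  | cons x xs ih => intro a; simp [ih, add_assoc]

-- summing an if-indicator over a nodup list with the same members as lines.toFinset
lemma pv_countP_finset (p : String → Bool) (l : List String) :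
    ∑ a ∈ l.toFinset, (if p a then l.count a else 0) = l.countP p := by
  induction l with
  | nil => simp
  | cons x xs ih =>
      by_cases hx : x ∈ xs
      · rw [List.toFinset_cons, Finset.insert_eq_self.2 (List.mem_toFinset.2 hx)]
        rw [List.countP_cons]
        have : ∀ a ∈ xs.toFinset, (if p a then (x :: xs).count a else 0)
            = (if p a then xs.count a else 0) + (if a = x ∧ p a then 1 else 0) := by
          intro a _
          by_cases hpa : p a
          · by_cases hax : a = x
            · subst hax; simp [hpa, List.count_cons_self]
            · simp [hpa, hax, List.count_cons_of_ne (by exact fun h => hax h.symm)]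
          · simp [hpa]
        rw [Finset.sum_congr rfl this, Finset.sum_add_distrib, ih]
        have hsummand : ∀ a, (if a = x ∧ p a then (1 : Nat) else 0)
            = if a = x then (if p x then 1 else 0) else 0 := by
          intro a
          by_cases h : a = x
          · subst h; by_cases hp : p a <;> simp [hp]
          · simp [h]
        have : ∑ a ∈ xs.toFinset, (if a = x ∧ p a then 1 else 0)
            = if p x then 1 else 0 := by
          rw [Finset.sum_congr rfl (fun a _ => hsummand a)]
          simp [Finset.sum_ite_eq', List.mem_toFinset.2 hx]
        omega
      · rw [List.toFinset_cons, Finset.sum_insert (by simp [hx])]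
        rw [List.countP_cons]
        have hx' : ∀ a ∈ xs.toFinset, (if p a then (x :: xs).count a else 0)
            = (if p a then xs.count a else 0) := by
          intro a ha
          have : a ≠ x := by
            intro h; subst h; exact hx (List.mem_toFinset.1 ha)
          simp [List.count_cons_of_ne (fun h => this h.symm)]
        rw [Finset.sum_congr rfl hx', ih]
        simp [List.count_eq_zero_of_not_mem hx]
        omega

-- summing lines.count over the distinct lines satisfying p counts the lines satisfying p
lemma pv_distinct_sum (p : String → Bool) (lines : List String) :
    ((((PySem.Set.ofList lines).map (fun k => (k, (lines.count k : Int)))).filter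
        (fun q => p q.1)).map (·.2)).sum
      = ((lines.countP p : Nat) : Int) := by
  rw [List.filter_map, List.map_map]
  simp only [Function.comp_def]
  have hnd : (PySem.Set.ofList lines).Nodup := PySem.Set.nodup_ofList lines
  have hfil : ((PySem.Set.ofList lines).filter (fun k => p k)).Nodup := hnd.filter _
  have hmem : ∀ x, x ∈ PySem.Set.ofList lines ↔ x ∈ lines := fun x => PySem.Set.mem_ofList lines x
  -- turn the list sum into a Finset sum with an if-indicator
  have key : (((PySem.Set.ofList lines).filter (fun k => p k)).map
        (fun k => (lines.count k : Int))).sum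
      = ∑ a ∈ lines.toFinset, (if p a then (lines.count a : Int) else 0) := by
    rw [← List.sum_toFinset _ hfil]
    have hts : ((PySem.Set.ofList lines).filter (fun k => p k)).toFinset
        = lines.toFinset.filter (fun a => p a) := by
      apply Finset.ext
      intro a
      simp [List.mem_toFinset, hmem, Finset.mem_filter, and_comm]
    rw [hts, Finset.sum_filter]
  rw [key, ← pv_countP_finset p lines, Nat.cast_sum]
  apply Finset.sum_congr rfl
  intro a _
  split <;> simp

-- ===== VERDICT (by name: the statement is the Claim_ definition above) =====
theorem categorize_output_spec : Claim_equal_categorize_output := by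
  intro output categories _ hpre
  unfold Spec_categorize_output categorize_output categorize_output_alt
  obtain ⟨init, last, rfl⟩ : ∃ init last, categories = init ++ [last] := by
    refine ⟨categories.dropLast, categories.getLast hpre, ?_⟩
    exact (List.dropLast_append_getLast hpre).symm
  have hslice := pv_slice_snoc init last
  have hlast : PySem.List.pyGetD (init ++ [last]) (-1) "" = last :=
    PySem.List.pyGetD_neg_one_append_singleton init last ""
  set lines := (PySem.Str.split? output "\n").getD [] with hlines
  simp only [hslice, hlast, List.length_append, List.length_singleton,
    List.replicate_succ']
  rw [pv_main init last _ _ _ (by simp)]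
  rw [pv_zip_zero_left _ _ (by simp), zero_add]
  -- B's dictionary is the counter of the lines
  rw [PySem.Dict.foldl_insert_getD_add_one_eq_counter]
  congr 1
  · apply List.map_congr_left
    intro cat _
    rw [pv_foldl_sum, zero_add, PySem.Dict.items_counter, pv_distinct_sum]
  · rw [PySem.Dict.getD_counter]
    rw [show List.count last lines = lines.countP (fun line => line == last) from
      List.count_eq_countP ..]
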